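-- pv_equiv track=rewrite | github.com/JerryGgzm/SEO_TOOL | modules/trend_analysis/data_processor.py | _create_time_buckets
-- ===== SOURCE A (Python) =====
-- from typing import List, Dict, Any
--
-- def _create_time_buckets(tweets: List[Dict[str, Any]],
--                        hours: int) -> List[Dict[str, Any]]:
--     """create time buckets for analysis"""
--     bucket_size = max(1, len(tweets) // 4)  # 分成4个时间段
--     buckets = []
--
--     for i in range(0, len(tweets), bucket_size):
--         bucket_tweets = tweets[i:i + bucket_size]
--         total_engagement = sum(
--             tweet.get('public_metrics', {}).get('like_count', 0) +
--             tweet.get('public_metrics', {}).get('retweet_count', 0)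
--             for tweet in bucket_tweets
--         )
--
--         buckets.append({
--             'tweet_count': len(bucket_tweets),
--             'total_engagement': total_engagement,
--             'bucket_index': len(buckets)
--         })
--
--     return buckets
-- ===== SOURCE B (Python) =====
-- from typing import List, Dict, Any
--
-- def _create_time_buckets(tweets: List[Dict[str, Any]],
--                        hours: int) -> List[Dict[str, Any]]:
--     """create time buckets: single flat pass with running per-bucket accumulators"""
--     bucket_size = max(1, len(tweets) // 4)
--     totals = []  # (tweet_count, total_engagement) per bucket, in order
--     for idx, tweet in enumerate(tweets):
--         m = tweet.get('public_metrics', {})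
--         e = m.get('like_count', 0) + m.get('retweet_count', 0)
--         if idx // bucket_size == len(totals):
--             totals.append((1, e))
--         else:
--             c, s = totals[-1]
--             totals[-1] = (c + 1, s + e)
--     return [{'tweet_count': c, 'total_engagement': s, 'bucket_index': i}
--             for i, (c, s) in enumerate(totals)]
-- ===== Notes on version B (the rewrite author's own statement) =====
-- stated objective: alternative
-- what changed: Replaces the slicing loop (range stepping by bucket_size, extracting each sublist and summing it with a generator) by a single flat pass over enumerate(tweets) that assigns each tweet to bucket idx // bucket_size and updates running (count, engagement) accumulators, emitting the buckets afterwards.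
import Mathlib
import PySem

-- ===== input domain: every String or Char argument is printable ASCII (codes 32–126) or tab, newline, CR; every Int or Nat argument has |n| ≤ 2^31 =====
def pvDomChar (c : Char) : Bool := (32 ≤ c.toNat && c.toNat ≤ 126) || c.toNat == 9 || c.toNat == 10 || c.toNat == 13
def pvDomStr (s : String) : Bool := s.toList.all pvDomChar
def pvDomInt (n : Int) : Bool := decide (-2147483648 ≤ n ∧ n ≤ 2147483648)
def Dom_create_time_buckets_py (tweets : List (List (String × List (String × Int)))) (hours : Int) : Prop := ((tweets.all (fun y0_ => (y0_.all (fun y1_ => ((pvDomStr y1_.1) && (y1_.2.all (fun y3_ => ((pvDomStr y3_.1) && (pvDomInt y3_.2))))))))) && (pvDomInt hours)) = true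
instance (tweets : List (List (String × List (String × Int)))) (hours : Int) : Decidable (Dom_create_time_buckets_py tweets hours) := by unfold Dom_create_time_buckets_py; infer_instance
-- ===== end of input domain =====

-- B replaces A's slicing loop (stepping by bucket_size, extracting each sublist and summing it)
-- by a single flat pass over enumerate(tweets) with running per-bucket accumulators: alternative decomposition, same cost.

-- ===== PORT A =====
def create_time_buckets_py (tweets : List (List (String × List (String × Int)))) (hours : Int) : List (List (String × Int)) :=
  let bucket_size : Int := max 1 (PySem.Int.floordiv (tweets.length : Int) 4)
  (PySem.List.pyRange 0 (tweets.length : Int) bucket_size).foldl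
    (fun (buckets : List (List (String × Int))) (i : Int) =>
      let bucket_tweets := PySem.List.slice tweets (some i) (some (i + bucket_size))
      let total_engagement : Int :=
        (bucket_tweets.map (fun tweet =>
          PySem.Dict.getD (PySem.Dict.mk (PySem.Dict.getD (PySem.Dict.mk tweet) "public_metrics" [])) "like_count" 0
          + PySem.Dict.getD (PySem.Dict.mk (PySem.Dict.getD (PySem.Dict.mk tweet) "public_metrics" [])) "retweet_count" 0)).sum
      buckets ++ [[("tweet_count", (bucket_tweets.length : Int)),
                   ("total_engagement", total_engagement),
                   ("bucket_index", (buckets.length : Int))]]) []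

-- ===== PORT B =====
def create_time_buckets_py_alt (tweets : List (List (String × List (String × Int)))) (hours : Int) : List (List (String × Int)) :=
  let bucket_size : Int := max 1 (PySem.Int.floordiv (tweets.length : Int) 4)
  let totals : List (Int × Int) :=
    (PySem.List.enumerate tweets 0).foldl
      (fun (totals : List (Int × Int)) (p : Int × List (String × List (String × Int))) =>
        let m := PySem.Dict.getD (PySem.Dict.mk p.2) "public_metrics" []
        let e : Int := PySem.Dict.getD (PySem.Dict.mk m) "like_count" 0 + PySem.Dict.getD (PySem.Dict.mk m) "retweet_count" 0
        if PySem.Int.floordiv p.1 bucket_size = (totals.length : Int) then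
          totals ++ [(1, e)]
        else
          totals.dropLast ++ [((totals.getLastD (0, 0)).1 + 1, (totals.getLastD (0, 0)).2 + e)]) []
  (PySem.List.enumerate totals 0).map
    (fun q => [("tweet_count", q.2.1), ("total_engagement", q.2.2), ("bucket_index", q.1)])

-- ===== PRECONDITION & SPEC =====
def Spec_create_time_buckets_py (tweets : List (List (String × List (String × Int)))) (hours : Int) (out : List (List (String × Int))) : Prop := out = create_time_buckets_py_alt tweets hours
instance (tweets : List (List (String × List (String × Int)))) (hours : Int) (out : List (List (String × Int))) : Decidable (Spec_create_time_buckets_py tweets hours out) := by unfold Spec_create_time_buckets_py; infer_instance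

-- ===== CLAIM (what is proved, stated in full; the proofs are below) =====
def Claim_equal_create_time_buckets_py : Prop := ∀ (tweets : List (List (String × List (String × Int)))) (hours : Int), Dom_create_time_buckets_py tweets hours → Spec_create_time_buckets_py tweets hours (create_time_buckets_py tweets hours)

-- ===== LEMMAS AND PROOFS =====

-- engagement of one tweet (the expression both loop bodies compute)
def pvE (t : List (String × List (String × Int))) : Int :=
  PySem.Dict.getD (PySem.Dict.mk (PySem.Dict.getD (PySem.Dict.mk t) "public_metrics" [])) "like_count" 0
  + PySem.Dict.getD (PySem.Dict.mk (PySem.Dict.getD (PySem.Dict.mk t) "public_metrics" [])) "retweet_count" 0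

def pvSum (l : List (List (String × List (String × Int)))) : Int := (l.map pvE).sum

theorem pvSum_snoc (l : List (List (String × List (String × Int)))) (x : List (String × List (String × Int))) :
    pvSum (l ++ [x]) = pvSum l + pvE x := by
  simp [pvSum]

-- the per-bucket statistics (count, engagement) of the chunks of size bs+1, in order
def chunkStats (bs : Nat) (l : List (List (String × List (String × Int)))) : List (Int × Int) :=
  if h : l = [] then []
  else (((l.take (bs + 1)).length : Int), pvSum (l.take (bs + 1))) :: chunkStats bs (l.drop (bs + 1))
termination_by l.length
decreasing_by
  cases l with
  | nil => simp_all
  | cons a t => simp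

theorem chunkStats_nil (bs : Nat) : chunkStats bs [] = [] := by
  rw [chunkStats.eq_def]
  simp

theorem chunkStats_eq (bs : Nat) (l : List (List (String × List (String × Int)))) (h : l ≠ []) :
    chunkStats bs l
      = (((l.take (bs + 1)).length : Int), pvSum (l.take (bs + 1))) :: chunkStats bs (l.drop (bs + 1)) := by
  rw [chunkStats.eq_def, dif_neg h]

theorem chunkStats_ne_nil (bs : Nat) (l : List (List (String × List (String × Int)))) (h : l ≠ []) :
    chunkStats bs l ≠ [] := by
  rw [chunkStats_eq bs l h]
  simp

theorem chunkStats_length (bs : Nat) : ∀ (l : List (List (String × List (String × Int)))),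
    (chunkStats bs l).length = (l.length + bs) / (bs + 1) := by
  intro l
  induction hn : l.length using Nat.strong_induction_on generalizing l with
  | _ n ih =>
    cases l with
    | nil =>
      rw [chunkStats_nil]
      simp only [List.length_nil] at hn
      subst hn
      simp [Nat.div_eq_of_lt (show bs < bs + 1 by omega)]
    | cons a t =>
      simp only [List.length_cons] at hn
      subst hn
      rw [chunkStats_eq bs (a :: t) (List.cons_ne_nil a t)]
      have hd : ((a :: t).drop (bs + 1)).length = t.length + 1 - (bs + 1) := by
        simp [List.length_drop]
      have hrec := ih (((a :: t).drop (bs + 1)).length) (by rw [hd]; omega) _ rfl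
      rw [List.length_cons, hrec, hd]
      by_cases hle : t.length + 1 ≤ bs + 1
      · have h1 : (t.length + 1 - (bs + 1) + bs) / (bs + 1) = 0 := Nat.div_eq_of_lt (by omega)
        have h2 : (t.length + 1 + bs) / (bs + 1) = 1 := Nat.div_eq_of_lt_le (by omega) (by omega)
        omega
      · rw [show t.length + 1 + bs = (t.length + 1 - (bs + 1) + bs) + (bs + 1) by omega,
            Nat.add_div_right _ (by omega)]

theorem div_snoc_iff (bs k : Nat) : k / (bs + 1) = (k + bs) / (bs + 1) ↔ k % (bs + 1) = 0 := by
  have hdm := Nat.div_add_mod k (bs + 1)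
  have hr : k % (bs + 1) < bs + 1 := Nat.mod_lt _ (by omega)
  have h1 : k + bs = (bs + 1) * (k / (bs + 1)) + (k % (bs + 1) + bs) := by omega
  rw [h1, Nat.mul_add_div (by omega)]
  rcases Nat.eq_zero_or_pos (k % (bs + 1)) with h | h
  · simp [h, Nat.div_eq_of_lt (show bs < bs + 1 by omega)]
  · have h2 : (k % (bs + 1) + bs) / (bs + 1) = 1 := Nat.div_eq_of_lt_le (by omega) (by omega)
    rw [h2]
    omega

theorem dropLast_getLastD_cons {α : Type} (c : α) (r : List α) (hr : r ≠ []) (d : α) :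
    (c :: r).dropLast = c :: r.dropLast ∧ (c :: r).getLastD d = r.getLastD d := by
  rcases List.eq_nil_or_concat r with h | ⟨ys, y, h⟩
  · exact absurd h hr
  · subst h
    rw [List.concat_eq_append, ← List.cons_append]
    constructor
    · rw [List.dropLast_concat, List.dropLast_concat]
    · rw [List.getLastD_concat, List.getLastD_concat]

theorem chunkStats_snoc (bs : Nat) (x : List (String × List (String × Int))) :
    ∀ (l : List (List (String × List (String × Int)))),
    chunkStats bs (l ++ [x]) =
      if l.length % (bs + 1) = 0 then
        chunkStats bs l ++ [(1, pvE x)]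
      else
        (chunkStats bs l).dropLast
          ++ [(((chunkStats bs l).getLastD (0, 0)).1 + 1, ((chunkStats bs l).getLastD (0, 0)).2 + pvE x)] := by
  intro l
  induction hn : l.length using Nat.strong_induction_on generalizing l with
  | _ n ih =>
    cases l with
    | nil =>
      rw [List.nil_append, chunkStats_eq bs [x] (by simp),
          List.take_of_length_le (by simp), List.drop_eq_nil_of_le (by simp), chunkStats_nil]
      simp [pvSum, pvE]
    | cons a t =>
      simp only [List.length_cons] at hn
      subst hn
      by_cases hle : t.length + 1 ≤ bs
      · -- everything still fits in one (partial) chunk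
        rw [chunkStats_eq bs ((a :: t) ++ [x]) (by simp),
            chunkStats_eq bs (a :: t) (List.cons_ne_nil a t)]
        rw [List.take_of_length_le (by simp only [List.length_append, List.length_cons, List.length_nil]; omega),
            List.take_of_length_le (by simp only [List.length_cons]; omega),
            List.drop_eq_nil_of_le (by simp only [List.length_append, List.length_cons, List.length_nil]; omega),
            List.drop_eq_nil_of_le (by simp only [List.length_cons]; omega),
            chunkStats_nil]
        rw [if_neg (by
          rw [Nat.mod_eq_of_lt (by omega)]
          omega)]
        rw [pvSum_snoc]
        simp [List.length_append]
      · -- the first chunk is full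
        push_neg at hle
        have htk : ((a :: t) ++ [x]).take (bs + 1) = (a :: t).take (bs + 1) :=
          List.take_append_of_le_length (by simp only [List.length_cons]; omega)
        have hdp : ((a :: t) ++ [x]).drop (bs + 1) = (a :: t).drop (bs + 1) ++ [x] :=
          List.drop_append_of_le_length (by simp only [List.length_cons]; omega)
        rw [chunkStats_eq bs ((a :: t) ++ [x]) (by simp), htk, hdp,
            chunkStats_eq bs (a :: t) (List.cons_ne_nil a t)]
        have hdlen : ((a :: t).drop (bs + 1)).length = (a :: t).length - (bs + 1) := List.length_drop
        have hrec := ih (((a :: t).drop (bs + 1)).length)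
          (by simp only [List.length_cons] at *; omega) _ rfl
        rw [hrec]
        have hmodeq : (a :: t).length % (bs + 1) = ((a :: t).drop (bs + 1)).length % (bs + 1) := by
          rw [hdlen]
          conv_lhs => rw [show (a :: t).length = ((a :: t).length - (bs + 1)) + (bs + 1) by
            simp only [List.length_cons]; omega]
          rw [Nat.add_mod_right]
        by_cases hmod : ((a :: t).drop (bs + 1)).length % (bs + 1) = 0
        · rw [if_pos hmod, if_pos (by simp only [List.length_cons] at hmodeq ⊢; rw [hmodeq]; exact hmod)]
          simp
        · rw [if_neg hmod, if_neg (by simp only [List.length_cons] at hmodeq ⊢; rw [hmodeq]; exact hmod)]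
          have hdnil : (a :: t).drop (bs + 1) ≠ [] := by
            intro hcon
            rw [hcon] at hmod
            simp at hmod
          have hcsnil : chunkStats bs ((a :: t).drop (bs + 1)) ≠ [] := chunkStats_ne_nil bs _ hdnil
          obtain ⟨hdl, hgl⟩ := dropLast_getLastD_cons
            ((((List.take (bs + 1) (a :: t)).length : Int), pvSum (List.take (bs + 1) (a :: t))))
            (chunkStats bs ((a :: t).drop (bs + 1))) hcsnil (0, 0)
          rw [hdl, hgl, List.cons_append]

-- positive-step ranges with Nat endpoints: nil and cons unfoldings
theorem pyRangeN_nil (m n : Nat) (s : Int) (hs : 0 < s) (h : n ≤ m) :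
    PySem.List.pyRange (m : Int) (n : Int) s = [] := by
  rw [PySem.List.pyRange_of_pos _ _ hs]
  have h2 : ¬ ((m : Int) < (n : Int)) := by exact_mod_cast Nat.not_lt.mpr h
  simp [h2]

theorem castDivNat (a b : Nat) : (((a : Int)) / ((b : Int))).toNat = a / b := by
  rcases Nat.eq_zero_or_pos b with hb | hb
  · subst hb
    simp
  · have h := PySem.Int.floordiv_natCast a b
    rw [PySem.Int.floordiv_eq_ediv_of_pos (by exact_mod_cast hb)] at h
    rw [h, Int.toNat_natCast]

theorem pyRangeN_cons (m n bs : Nat) (h : m < n) :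
    PySem.List.pyRange (m : Int) (n : Int) ((bs : Int) + 1)
      = (m : Int) :: PySem.List.pyRange (((m + (bs + 1) : Nat)) : Int) (n : Int) ((bs : Int) + 1) := by
  have hs : (0 : Int) < (bs : Int) + 1 := by positivity
  rw [PySem.List.pyRange_of_pos _ _ hs, PySem.List.pyRange_of_pos _ _ hs]
  have hlt : ((m : Int) < (n : Int)) := by exact_mod_cast h
  rw [if_pos hlt]
  have e1 : (((n : Int) - (m : Int) + ((bs : Int) + 1) - 1) / ((bs : Int) + 1)).toNat
      = (n - m + bs) / (bs + 1) := by
    rw [show ((n : Int) - (m : Int) + ((bs : Int) + 1) - 1) = ((n - m + bs : Nat) : Int) by push_cast; omega,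
        show ((bs : Int) + 1) = ((bs + 1 : Nat) : Int) by push_cast; ring]
    exact castDivNat _ _
  rw [e1]
  have hC : (n - m + bs) / (bs + 1)
      = (if ((m + (bs + 1) : Nat) : Int) < (n : Int) then
          (((n : Int) - ((m + (bs + 1) : Nat) : Int) + ((bs : Int) + 1) - 1) / ((bs : Int) + 1)).toNat
        else 0) + 1 := by
    by_cases h2 : m + (bs + 1) < n
    · rw [if_pos (by exact_mod_cast h2)]
      have e2 : (((n : Int) - ((m + (bs + 1) : Nat) : Int) + ((bs : Int) + 1) - 1) / ((bs : Int) + 1)).toNat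
          = (n - (m + (bs + 1)) + bs) / (bs + 1) := by
        rw [show ((n : Int) - ((m + (bs + 1) : Nat) : Int) + ((bs : Int) + 1) - 1)
              = ((n - (m + (bs + 1)) + bs : Nat) : Int) by push_cast; omega,
            show ((bs : Int) + 1) = ((bs + 1 : Nat) : Int) by push_cast; ring]
        exact castDivNat _ _
      rw [e2, show n - m + bs = (n - (m + (bs + 1)) + bs) + (bs + 1) by omega,
          Nat.add_div_right _ (by omega)]
    · rw [if_neg (by exact_mod_cast h2)]
      exact Nat.div_eq_of_lt_le (by omega) (by omega)
  rw [hC, List.range_succ_eq_map, List.map_cons, List.map_map]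
  congr 1
  refine List.map_congr_left (fun a _ => ?_)
  simp only [Function.comp_apply]
  push_cast
  ring

-- A's loop, generalized over the start offset and the accumulator
theorem foldA (bs : Nat) (tweets : List (List (String × List (String × Int)))) :
    ∀ (m : Nat) (acc : List (List (String × Int))),
    (PySem.List.pyRange (m : Int) (tweets.length : Int) ((bs : Int) + 1)).foldl
      (fun (buckets : List (List (String × Int))) (i : Int) =>
        buckets ++ [[("tweet_count", ((PySem.List.slice tweets (some i) (some (i + ((bs : Int) + 1)))).length : Int)),
                     ("total_engagement", ((PySem.List.slice tweets (some i) (some (i + ((bs : Int) + 1)))).map (fun tweet =>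
                        PySem.Dict.getD (PySem.Dict.mk (PySem.Dict.getD (PySem.Dict.mk tweet) "public_metrics" [])) "like_count" 0
                        + PySem.Dict.getD (PySem.Dict.mk (PySem.Dict.getD (PySem.Dict.mk tweet) "public_metrics" [])) "retweet_count" 0)).sum),
                     ("bucket_index", (buckets.length : Int))]]) acc
    = acc ++ (PySem.List.enumerate (chunkStats bs (tweets.drop m)) (acc.length : Int)).map
        (fun q => [("tweet_count", q.2.1), ("total_engagement", q.2.2), ("bucket_index", q.1)]) := by
  intro m acc
  induction hfuel : tweets.length - m using Nat.strong_induction_on generalizing m acc with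
  | _ f ih =>
    by_cases hm : tweets.length ≤ m
    · rw [pyRangeN_nil _ _ _ (by positivity) hm, List.drop_eq_nil_of_le hm, chunkStats_nil]
      simp [PySem.List.enumerate_nil]
    · push_neg at hm
      rw [pyRangeN_cons m _ bs hm]
      simp only [List.foldl_cons]
      have hslice : PySem.List.slice tweets (some (m : Int)) (some ((m : Int) + ((bs : Int) + 1)))
          = (tweets.drop m).take (bs + 1) := by
        rw [show ((m : Int) + ((bs : Int) + 1)) = ((m : Int) + ((bs + 1 : Nat) : Int)) by push_cast; ring]
        exact PySem.List.slice_natCast_add tweets m (bs + 1)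
      rw [hslice]
      have hdnil : tweets.drop m ≠ [] := by
        rw [Ne, List.drop_eq_nil_iff]
        omega
      rw [chunkStats_eq bs (tweets.drop m) hdnil]
      have hdd : (tweets.drop m).drop (bs + 1) = tweets.drop (m + (bs + 1)) := by
        rw [List.drop_drop]
      rw [hdd, PySem.List.enumerate_cons]
      rw [ih (tweets.length - (m + (bs + 1))) (by omega) (m + (bs + 1)) _ rfl]
      rw [show ((List.take (bs + 1) (List.drop m tweets)).map (fun tweet =>
            PySem.Dict.getD (PySem.Dict.mk (PySem.Dict.getD (PySem.Dict.mk tweet) "public_metrics" [])) "like_count" 0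
            + PySem.Dict.getD (PySem.Dict.mk (PySem.Dict.getD (PySem.Dict.mk tweet) "public_metrics" [])) "retweet_count" 0)).sum
          = pvSum (List.take (bs + 1) (List.drop m tweets)) from rfl]
      simp only [List.map_cons]
      simp [List.append_assoc]

-- B's loop: after the first k tweets the accumulator holds the chunk statistics of the prefix
theorem foldB (bs : Nat) (tweets : List (List (String × List (String × Int)))) :
    ∀ (k : Nat), k ≤ tweets.length →
    (PySem.List.enumerate (tweets.take k) 0).foldl
      (fun (totals : List (Int × Int)) (p : Int × List (String × List (String × Int))) =>
        if PySem.Int.floordiv p.1 ((bs : Int) + 1) = (totals.length : Int) then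
          totals ++ [(1,
            PySem.Dict.getD (PySem.Dict.mk (PySem.Dict.getD (PySem.Dict.mk p.2) "public_metrics" [])) "like_count" 0
            + PySem.Dict.getD (PySem.Dict.mk (PySem.Dict.getD (PySem.Dict.mk p.2) "public_metrics" [])) "retweet_count" 0)]
        else
          totals.dropLast ++ [((totals.getLastD (0, 0)).1 + 1, (totals.getLastD (0, 0)).2
            + (PySem.Dict.getD (PySem.Dict.mk (PySem.Dict.getD (PySem.Dict.mk p.2) "public_metrics" [])) "like_count" 0
            + PySem.Dict.getD (PySem.Dict.mk (PySem.Dict.getD (PySem.Dict.mk p.2) "public_metrics" [])) "retweet_count" 0))]) []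
    = chunkStats bs (tweets.take k) := by
  intro k
  induction k with
  | zero =>
    intro _
    simp [chunkStats_nil, PySem.List.enumerate_nil]
  | succ k ih =>
    intro hk
    have hk' : k < tweets.length := hk
    have htake : tweets.take (k + 1) = tweets.take k ++ [tweets[k]] := by
      rw [List.take_succ]
      simp [List.getElem?_eq_getElem hk']
    have hlen : (tweets.take k).length = k := by
      rw [List.length_take]
      omega
    rw [htake, PySem.List.enumerate_append, List.foldl_append, ih (by omega), hlen]
    rw [PySem.List.enumerate_cons, PySem.List.enumerate_nil]
    simp only [List.foldl_cons, List.foldl_nil]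
    rw [chunkStats_snoc, hlen]
    have hfd : PySem.Int.floordiv (0 + (k : Int)) ((bs : Int) + 1) = ((k / (bs + 1) : Nat) : Int) := by
      rw [zero_add, show ((bs : Int) + 1) = ((bs + 1 : Nat) : Int) by push_cast; ring]
      exact PySem.Int.floordiv_natCast k (bs + 1)
    have hcond : (PySem.Int.floordiv (0 + (k : Int)) ((bs : Int) + 1)
        = ((chunkStats bs (tweets.take k)).length : Int)) ↔ k % (bs + 1) = 0 := by
      rw [hfd, chunkStats_length, hlen, Nat.cast_inj]
      exact div_snoc_iff bs k
    by_cases hmod : k % (bs + 1) = 0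
    · rw [if_pos (hcond.mpr hmod), if_pos hmod]
      simp [pvE]
    · rw [if_neg (fun hc => hmod (hcond.mp hc)), if_neg hmod]
      simp [pvE]

-- ===== VERDICT (by name: the statement is the Claim_ definition above) =====
theorem create_time_buckets_py_spec : Claim_equal_create_time_buckets_py := by
  intro tweets hours _
  unfold Spec_create_time_buckets_py
  obtain ⟨bs, hbs⟩ : ∃ bs : Nat, max 1 (PySem.Int.floordiv (tweets.length : Int) 4) = (bs : Int) + 1 := by
    refine ⟨max 1 (tweets.length / 4) - 1, ?_⟩
    have h4 : PySem.Int.floordiv ((tweets.length : Nat) : Int) (((4 : Nat) : Int))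
        = ((tweets.length / 4 : Nat) : Int) := PySem.Int.floordiv_natCast _ _
    rw [show (4 : Int) = ((4 : Nat) : Int) by norm_num, h4,
        show (1 : Int) = ((1 : Nat) : Int) by norm_num, ← Nat.cast_max]
    have h1 : 1 ≤ max 1 (tweets.length / 4) := le_max_left _ _
    generalize hM : max 1 (tweets.length / 4) = M at h1 ⊢
    omega
  show create_time_buckets_py tweets hours = create_time_buckets_py_alt tweets hours
  simp only [create_time_buckets_py, create_time_buckets_py_alt]
  rw [hbs]
  have hA := foldA bs tweets 0 []
  have hB := foldB bs tweets tweets.length le_rfl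
  rw [List.take_length] at hB
  simp only [Nat.cast_zero, List.drop_zero, List.nil_append, List.length_nil] at hA
  rw [hA, hB]
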